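-- pv_equiv track=rewrite | github.com/jcbgamboa/dataset_tools | amazon_product_data/analyse_amazon_reviews.py | format_data_to_plot
-- ===== SOURCE A (Python) =====
-- def format_data_to_plot(data, order, plot_type=0):
-- 	pos_next = []
-- 	neg_next = []
-- 	pos_head = []
-- 	neg_head = []
-- 	for i in order:
-- 		counts = data[i][plot_type]
-- 		pos_next.append(counts[0])
-- 		neg_next.append(counts[1])
-- 		pos_head.append(counts[2])
-- 		neg_head.append(counts[3])
--
-- 	return (pos_next, neg_next, pos_head, neg_head)
-- ===== SOURCE B (Python) =====
-- def format_data_to_plot(data, order, plot_type=0):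
--     rows = [data[i][plot_type] for i in order]
--     if not rows:
--         return ([], [], [], [])
--     pos_next, neg_next, pos_head, neg_head = zip(*(r[:4] for r in rows))
--     return (list(pos_next), list(neg_next), list(pos_head), list(neg_head))
-- ===== Notes on version B (the rewrite author's own statement) =====
-- stated objective: idiomatic
-- what changed: B builds the list of selected count rows once with a comprehension and transposes it via zip(*) into the four result lists, instead of growing four parallel accumulator lists inside an explicit loop.
import Mathlib
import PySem

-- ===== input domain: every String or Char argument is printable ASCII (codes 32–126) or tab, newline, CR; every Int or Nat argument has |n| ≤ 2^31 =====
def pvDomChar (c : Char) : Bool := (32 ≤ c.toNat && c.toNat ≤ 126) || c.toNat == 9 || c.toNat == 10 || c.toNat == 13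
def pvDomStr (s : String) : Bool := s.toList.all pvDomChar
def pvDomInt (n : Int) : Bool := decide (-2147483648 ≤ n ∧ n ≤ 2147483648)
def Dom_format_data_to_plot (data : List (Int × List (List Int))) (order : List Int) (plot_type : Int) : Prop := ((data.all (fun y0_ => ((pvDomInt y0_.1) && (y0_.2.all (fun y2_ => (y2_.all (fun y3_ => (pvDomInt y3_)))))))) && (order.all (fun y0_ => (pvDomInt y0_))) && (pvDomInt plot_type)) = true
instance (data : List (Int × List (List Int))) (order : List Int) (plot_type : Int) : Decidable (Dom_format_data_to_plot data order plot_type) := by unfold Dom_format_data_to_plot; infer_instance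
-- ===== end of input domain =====

-- ===== PORT A =====
-- B builds the selected rows once and transposes them (zip(*…)) instead of growing four
-- parallel accumulator lists inside the loop; equivalence of return values on Pre_.

-- data[i] : dict lookup (KeyError = none, outside Pre_)
def pvLookup (data : List (Int × List (List Int))) (i : Int) : Option (List (List Int)) :=
  (PySem.Dict.mk data).get? i

def pvLoopA (data : List (Int × List (List Int))) (plot_type : Int) :
    List Int → List Int → List Int → List Int → List Int →
    List Int × List Int × List Int × List Int
  | [], pn, nn, ph, nh => (pn, nn, ph, nh)
  | i :: rest, pn, nn, ph, nh =>
    match pvLookup data i with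
    | none => (pn, nn, ph, nh)      -- KeyError: outside Pre_
    | some row =>
      match PySem.List.pyGet? row plot_type with
      | none => (pn, nn, ph, nh)    -- IndexError: outside Pre_
      | some counts =>
        match PySem.List.pyGet? counts 0, PySem.List.pyGet? counts 1,
              PySem.List.pyGet? counts 2, PySem.List.pyGet? counts 3 with
        | some c0, some c1, some c2, some c3 =>
          pvLoopA data plot_type rest (pn ++ [c0]) (nn ++ [c1]) (ph ++ [c2]) (nh ++ [c3])
        | _, _, _, _ => (pn, nn, ph, nh)   -- IndexError on counts[k]: outside Pre_

def format_data_to_plot (data : List (Int × List (List Int))) (order : List Int) (plot_type : Int) : List Int × List Int × List Int × List Int :=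
  pvLoopA data plot_type order [] [] [] []

-- ===== PORT B =====
-- one element of B's comprehension [data[i][plot_type] for i in order]
-- (none = KeyError/IndexError, where the Python comprehension raises — outside Pre_)
def pvRowB (data : List (Int × List (List Int))) (plot_type : Int) (i : Int) : Option (List Int) :=
  (pvLookup data i).bind (fun row => PySem.List.pyGet? row plot_type)

def format_data_to_plot_alt (data : List (Int × List (List Int))) (order : List Int) (plot_type : Int) : List Int × List Int × List Int × List Int :=
  let rows := order.filterMap (pvRowB data plot_type)
  if rows.isEmpty then ([], [], [], [])
  else
    -- zip(*(r[:4] for r in rows)) unpacked into the four column lists; a row shorter than 4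
    -- makes the Python unpacking raise ValueError (outside Pre_), so the skip of filterMap there is unreached
    (rows.filterMap (fun r => (r.take 4)[0]?), rows.filterMap (fun r => (r.take 4)[1]?),
     rows.filterMap (fun r => (r.take 4)[2]?), rows.filterMap (fun r => (r.take 4)[3]?))

-- ===== PRECONDITION & SPEC =====
-- Pre_ excludes exactly the inputs on which A raises: an i in order that is not a key of data
-- (KeyError), plot_type out of range of data[i] (IndexError), or a selected row of fewer than
-- 4 counts (IndexError on counts[k]).
def Pre_format_data_to_plot (data : List (Int × List (List Int))) (order : List Int) (plot_type : Int) : Prop :=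
  (order.all (fun i =>
    match pvLookup data i with
    | none => false
    | some row =>
      match PySem.List.pyGet? row plot_type with
      | none => false
      | some counts => 4 ≤ counts.length)) = true
instance (data : List (Int × List (List Int))) (order : List Int) (plot_type : Int) : Decidable (Pre_format_data_to_plot data order plot_type) := by unfold Pre_format_data_to_plot; infer_instance
def pvWitness_format_data_to_plot : (List (Int × List (List Int))) × List Int × Int :=
  ([(0, [[1, 2, 3, 4], [5, 6, 7, 8]]), (2, [[9, 10, 11, 12]])], [0, 2, 0], 0)

def Spec_format_data_to_plot (data : List (Int × List (List Int))) (order : List Int) (plot_type : Int) (out : List Int × List Int × List Int × List Int) : Prop := out = format_data_to_plot_alt data order plot_type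
instance (data : List (Int × List (List Int))) (order : List Int) (plot_type : Int) (out : List Int × List Int × List Int × List Int) : Decidable (Spec_format_data_to_plot data order plot_type out) := by unfold Spec_format_data_to_plot; infer_instance

-- ===== CLAIM (what is proved, stated in full; the proofs are below) =====
def Claim_equal_format_data_to_plot : Prop := ∀ (data : List (Int × List (List Int))) (order : List Int) (plot_type : Int), Dom_format_data_to_plot data order plot_type → Pre_format_data_to_plot data order plot_type → Spec_format_data_to_plot data order plot_type (format_data_to_plot data order plot_type)

-- ===== LEMMAS AND PROOFS =====

-- the k-th appended value of A, as one Option-valued selector per index of order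
def pvColF (data : List (Int × List (List Int))) (plot_type : Int) (k : Nat) (i : Int) : Option Int :=
  (pvRowB data plot_type i).bind (fun r => (r.take 4)[k]?)

theorem pvGet_take_of_len {counts : List Int} {k : Nat} (hk : k < 4) (hlen : 4 ≤ counts.length) :
    PySem.List.pyGet? counts (k : Int) = (counts.take 4)[k]? ∧ ((counts.take 4)[k]?).isSome := by
  have hk' : k < counts.length := by omega
  simp [PySem.List.pyGet?_natCast, hk, List.getElem?_eq_getElem hk']

theorem pvLoopA_eq (data : List (Int × List (List Int))) (plot_type : Int) :
    ∀ (order : List Int),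
      (∀ i ∈ order, ∃ counts, pvRowB data plot_type i = some counts ∧ 4 ≤ counts.length) →
      ∀ pn nn ph nh,
        pvLoopA data plot_type order pn nn ph nh =
          (pn ++ order.filterMap (pvColF data plot_type 0),
           nn ++ order.filterMap (pvColF data plot_type 1),
           ph ++ order.filterMap (pvColF data plot_type 2),
           nh ++ order.filterMap (pvColF data plot_type 3)) := by
  intro order
  induction order with
  | nil => intro _ pn nn ph nh; simp [pvLoopA]
  | cons i rest ih =>
    intro h pn nn ph nh
    obtain ⟨counts, hrow, hlen⟩ := h i (by simp)
    rcases hlk : pvLookup data i with _ | row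
    · simp [pvRowB, hlk] at hrow
    have hpt : PySem.List.pyGet? row plot_type = some counts := by
      simpa [pvRowB, hlk] using hrow
    have h0 := pvGet_take_of_len (counts := counts) (k := 0) (by omega) hlen
    have h1 := pvGet_take_of_len (counts := counts) (k := 1) (by omega) hlen
    have h2 := pvGet_take_of_len (counts := counts) (k := 2) (by omega) hlen
    have h3 := pvGet_take_of_len (counts := counts) (k := 3) (by omega) hlen
    obtain ⟨c0, hc0⟩ := Option.isSome_iff_exists.mp h0.2
    obtain ⟨c1, hc1⟩ := Option.isSome_iff_exists.mp h1.2
    obtain ⟨c2, hc2⟩ := Option.isSome_iff_exists.mp h2.2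
    obtain ⟨c3, hc3⟩ := Option.isSome_iff_exists.mp h3.2
    have hrest := ih (fun j hj => h j (by simp [hj]))
    simp only [pvLoopA, hlk, hpt]
    rw [show PySem.List.pyGet? counts 0 = some c0 by rw [show (0:Int) = ((0:Nat):Int) by norm_num, h0.1]; exact hc0,
        show PySem.List.pyGet? counts 1 = some c1 by rw [show (1:Int) = ((1:Nat):Int) by norm_num, h1.1]; exact hc1,
        show PySem.List.pyGet? counts 2 = some c2 by rw [show (2:Int) = ((2:Nat):Int) by norm_num, h2.1]; exact hc2,
        show PySem.List.pyGet? counts 3 = some c3 by rw [show (3:Int) = ((3:Nat):Int) by norm_num, h3.1]; exact hc3]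
    dsimp only
    rw [hrest]
    simp only [List.filterMap_cons, pvColF, pvRowB, hlk, Option.bind_some, hpt,
               hc0, hc1, hc2, hc3, List.append_assoc, List.singleton_append]

-- ===== VERDICT (by name: the statement is the Claim_ definition above) =====
theorem format_data_to_plot_spec : Claim_equal_format_data_to_plot := by
  intro data order plot_type _ hpre
  have hall : ∀ i ∈ order, ∃ counts, pvRowB data plot_type i = some counts ∧ 4 ≤ counts.length := by
    intro i hi
    have := (List.all_eq_true.mp hpre) i hi
    rcases hlk : pvLookup data i with _ | row
    · simp [hlk] at this
    rcases hpt : PySem.List.pyGet? row plot_type with _ | counts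
    · simp [hlk, hpt] at this
    exact ⟨counts, by simp [pvRowB, hlk, hpt], by simpa [hlk, hpt] using this⟩
  show _ = _
  rw [show format_data_to_plot data order plot_type = _ from pvLoopA_eq data plot_type order hall [] [] [] []]
  cases horder : order with
  | nil => rfl
  | cons i rest =>
    obtain ⟨counts, hrow, _⟩ := hall i (by simp [horder])
    have hne : (order.filterMap (pvRowB data plot_type)).isEmpty = false := by
      simp only [horder, List.filterMap_cons, hrow, List.isEmpty_cons]
    rw [← horder]
    simp only [format_data_to_plot_alt, hne, Bool.false_eq_true, if_false,
               List.filterMap_filterMap, List.nil_append]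
    rfl
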